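-- pv_equiv track=rewrite | github.com/biocore/qiime | qiime/pick_otus.py | _prefilter_exact_prefixes
-- ===== SOURCE A (Python) =====
-- def _prefilter_exact_prefixes(seqs, prefix_length=100):
--     """
--     """
--     unique_prefixes = {}
--     for seq_id, seq in seqs:
--         seq_len = len(seq)
--         seq_id = seq_id.split()[0]
--         current_prefix = seq[:prefix_length]
--         try:
--             prefix_data = unique_prefixes[current_prefix]
--             if seq_len > prefix_data[2]:
--                 # if this is the longest seq with this prefix so far,
--                 # update the list of seq_ids, the best seq_len, and the
--                 # best hit seq_id
--                 prefix_data[0].append(seq_id)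
--                 prefix_data[1] = seq_id
--                 prefix_data[2] = seq_len
--                 prefix_data[3] = seq
--             else:
--                 # if longer have been seen, only update the list of seq_ids
--                 prefix_data[0].append(seq_id)
--         except KeyError:
--             # list of seq_ids mapped to this prefix, best hit seq_id, best
--             # hit seq_len
--             unique_prefixes[current_prefix] = [[seq_id],
--                                                seq_id,
--                                                seq_len,
--                                                seq]
--
--     # construct the result objects
--     filtered_seqs = []
--     seq_id_map = {}
--     for data in unique_prefixes.values():
--         filtered_seqs.append((data[1], data[3]))
--         seq_id_map[data[1]] = data[0]
--
--     return filtered_seqs, seq_id_map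
-- ===== SOURCE B (Python) =====
-- def _prefilter_exact_prefixes(seqs, prefix_length=100):
--     """Group-then-reduce: collect (id, seq) pairs per prefix, then pick each
--     group's first-longest representative with max()."""
--     groups = {}
--     for seq_id, seq in seqs:
--         groups.setdefault(seq[:prefix_length], []).append((seq_id.split()[0], seq))
--
--     filtered_seqs = []
--     seq_id_map = {}
--     for group in groups.values():
--         best_id, best_seq = max(group, key=lambda p: len(p[1]))
--         filtered_seqs.append((best_id, best_seq))
--         seq_id_map[best_id] = [i for i, _ in group]
--     return filtered_seqs, seq_id_map
-- ===== Notes on version B (the rewrite author's own statement) =====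
-- stated objective: alternative
-- what changed: A's single online pass that maintains the longest-so-far representative per prefix is replaced by a group-then-reduce decomposition: one pass collects (id, seq) pairs per prefix, a second pass picks each group's first-longest element with max(key=len) and builds both outputs.
import Mathlib
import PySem

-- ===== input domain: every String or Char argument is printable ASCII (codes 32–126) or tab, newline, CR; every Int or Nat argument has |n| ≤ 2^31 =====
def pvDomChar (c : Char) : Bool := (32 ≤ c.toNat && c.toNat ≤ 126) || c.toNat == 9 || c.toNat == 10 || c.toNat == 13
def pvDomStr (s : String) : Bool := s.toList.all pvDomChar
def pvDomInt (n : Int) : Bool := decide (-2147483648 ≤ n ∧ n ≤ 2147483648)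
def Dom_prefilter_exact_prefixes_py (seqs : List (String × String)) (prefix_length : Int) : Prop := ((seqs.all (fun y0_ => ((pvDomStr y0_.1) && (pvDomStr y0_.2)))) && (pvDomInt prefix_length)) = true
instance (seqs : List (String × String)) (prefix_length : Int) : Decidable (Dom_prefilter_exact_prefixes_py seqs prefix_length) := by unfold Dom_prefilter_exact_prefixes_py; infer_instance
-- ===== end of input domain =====

-- B re-decomposes A's online longest-so-far reduction as group-then-reduce (collect groups, then max per group); same O(n) cost, alternative structure; equivalence on inputs whose ids have a first whitespace token.

-- ===== PORT A =====
-- seq_id.split()[0]: Pre_ guarantees the split is nonempty, so the `getD ""` default is never used there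
def pvSplitId (seq_id : String) : String :=
  (PySem.List.pyGet? (PySem.Str.split₀ seq_id) 0).getD ""

-- one iteration of A's first loop: prefix_data is the 4-list [seq_ids, best_id, best_len, best_seq]
def pvStepA (prefix_length : Int)
    (d : PySem.Dict String (List String × String × Int × String))
    (p : String × String) : PySem.Dict String (List String × String × Int × String) :=
  let seq_len := PySem.Str.len p.2
  let sid := pvSplitId p.1
  let pfx := PySem.Str.slice p.2 none (some prefix_length)
  match d.get? pfx with
  | some pd =>
      if pd.2.2.1 < seq_len then
        d.insert pfx (pd.1 ++ [sid], sid, seq_len, p.2)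
      else
        d.insert pfx (pd.1 ++ [sid], pd.2.1, pd.2.2.1, pd.2.2.2)
  | none => d.insert pfx ([sid], sid, seq_len, p.2)

-- A's second loop over unique_prefixes.values()
def pvOutA (acc : List (String × String) × PySem.Dict String (List String))
    (data : List String × String × Int × String) :
    List (String × String) × PySem.Dict String (List String) :=
  (acc.1 ++ [(data.2.1, data.2.2.2)], acc.2.insert data.2.1 data.1)

def prefilter_exact_prefixes_py (seqs : List (String × String)) (prefix_length : Int) :
    (List (String × String)) × (List (String × List String)) :=
  let unique_prefixes := seqs.foldl (pvStepA prefix_length) PySem.Dict.empty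
  let r := unique_prefixes.values.foldl pvOutA ([], PySem.Dict.empty)
  (r.1, r.2.items)

-- ===== PORT B =====
def pvKeyB (p : String × String) : Int := PySem.Str.len p.2

-- one iteration of B's grouping loop: groups.setdefault(prefix, []).append((sid, seq))
def pvStepB (prefix_length : Int)
    (d : PySem.Dict String (List (String × String)))
    (p : String × String) : PySem.Dict String (List (String × String)) :=
  d.modify (PySem.Str.slice p.2 none (some prefix_length)) []
    (fun g => g ++ [(pvSplitId p.1, p.2)])

-- B's reduce loop over groups.values(); every stored group is nonempty, so the
-- `none` branch of max (Python: ValueError on an empty group) is unreachable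
def pvOutB (acc : List (String × String) × PySem.Dict String (List String))
    (g : List (String × String)) :
    List (String × String) × PySem.Dict String (List String) :=
  match PySem.List.max? g pvKeyB with
  | some m => (acc.1 ++ [(m.1, m.2)], acc.2.insert m.1 (g.map Prod.fst))
  | none => (acc.1 ++ [("", "")], acc.2.insert "" (g.map Prod.fst))

def prefilter_exact_prefixes_py_alt (seqs : List (String × String)) (prefix_length : Int) :
    (List (String × String)) × (List (String × List String)) :=
  let groups := seqs.foldl (pvStepB prefix_length) PySem.Dict.empty
  let r := groups.values.foldl pvOutB ([], PySem.Dict.empty)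
  (r.1, r.2.items)

-- ===== PRECONDITION & SPEC =====
-- Pre_ excludes inputs containing a seq_id that is empty or all whitespace: there seq_id.split()[0] raises IndexError in both A and B.
def Pre_prefilter_exact_prefixes_py (seqs : List (String × String)) (prefix_length : Int) : Prop :=
  ∀ p ∈ seqs, PySem.Str.split₀ p.1 ≠ []
instance (seqs : List (String × String)) (prefix_length : Int) : Decidable (Pre_prefilter_exact_prefixes_py seqs prefix_length) := by unfold Pre_prefilter_exact_prefixes_py; infer_instance

def pvWitness_prefilter_exact_prefixes_py : (List (String × String)) × Int :=
  ([("s1 extra", "ACGT"), ("s2", "AC"), ("s3", "ACT")], 2)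

def Spec_prefilter_exact_prefixes_py (seqs : List (String × String)) (prefix_length : Int) (out : (List (String × String)) × (List (String × List String))) : Prop := out = prefilter_exact_prefixes_py_alt seqs prefix_length
instance (seqs : List (String × String)) (prefix_length : Int) (out : (List (String × String)) × (List (String × List String))) : Decidable (Spec_prefilter_exact_prefixes_py seqs prefix_length out) := by unfold Spec_prefilter_exact_prefixes_py; infer_instance

-- ===== CLAIM (what is proved, stated in full; the proofs are below) =====
def Claim_equal_prefilter_exact_prefixes_py : Prop := ∀ (seqs : List (String × String)) (prefix_length : Int), Dom_prefilter_exact_prefixes_py seqs prefix_length → Pre_prefilter_exact_prefixes_py seqs prefix_length → Spec_prefilter_exact_prefixes_py seqs prefix_length (prefilter_exact_prefixes_py seqs prefix_length)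

-- ===== LEMMAS AND PROOFS =====

-- A's dict entry is the reduction of B's group
def pvReduce (g : List (String × String)) : List String × String × Int × String :=
  match PySem.List.max? g pvKeyB with
  | some m => (g.map Prod.fst, m.1, pvKeyB m, m.2)
  | none => ([], "", 0, "")

def pvF (q : String × List (String × String)) : String × (List String × String × Int × String) :=
  (q.1, pvReduce q.2)

def pvInv (dA : PySem.Dict String (List String × String × Int × String))
    (dB : PySem.Dict String (List (String × String))) : Prop :=
  dA.items = dB.items.map pvF ∧ dB.keys.Nodup ∧ ∀ q ∈ dB.items, q.2 ≠ []

theorem pvGet?_of_inv {dA : PySem.Dict String (List String × String × Int × String)}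
    {dB : PySem.Dict String (List (String × String))} (h : pvInv dA dB) (k : String) :
    dA.get? k = (dB.get? k).map pvReduce := by
  obtain ⟨h1, -, -⟩ := h
  simp only [PySem.Dict.get?, h1, List.find?_map]
  have : (fun p : String × (List String × String × Int × String) => p.1 == k) ∘ pvF
       = (fun q : String × List (String × String) => q.1 == k) := by
    funext q; simp [pvF]
  rw [this]
  cases dB.items.find? (fun q => q.1 == k) <;> simp [pvF]

theorem pvMax?_append_some (g : List (String × String)) (x m : String × String)
    (hm : PySem.List.max? g pvKeyB = some m) :
    PySem.List.max? (g ++ [x]) pvKeyB = if pvKeyB m < pvKeyB x then some x else some m := by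
  simp only [PySem.List.max?] at hm ⊢
  rw [List.foldl_append, hm]
  rfl

theorem pvReduce_append (g : List (String × String)) (x : String × String) (hg : g ≠ []) :
    pvReduce (g ++ [x]) =
      if (pvReduce g).2.2.1 < pvKeyB x then
        ((pvReduce g).1 ++ [x.1], x.1, pvKeyB x, x.2)
      else
        ((pvReduce g).1 ++ [x.1], (pvReduce g).2.1, (pvReduce g).2.2.1, (pvReduce g).2.2.2) := by
  rcases hm : PySem.List.max? g pvKeyB with _ | m
  · exact absurd ((PySem.List.max?_eq_none_iff _ _).mp hm) hg
  · simp only [pvReduce, pvMax?_append_some g x m hm, hm]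
    by_cases hlt : pvKeyB m < pvKeyB x <;> simp [hlt]

theorem pvStep_inv (pl : Int) (p : String × String)
    {dA : PySem.Dict String (List String × String × Int × String)}
    {dB : PySem.Dict String (List (String × String))} (h : pvInv dA dB) :
    pvInv (pvStepA pl dA p) (pvStepB pl dB p) := by
  obtain ⟨h1, h2, h3⟩ := h
  set pfx := PySem.Str.slice p.2 none (some pl) with hpfx
  set x : String × String := (pvSplitId p.1, p.2) with hx
  have hget := pvGet?_of_inv ⟨h1, h2, h3⟩ pfx
  have hcont : dA.contains pfx = dB.contains pfx := by
    rw [PySem.Dict.contains_eq_isSome_get?, PySem.Dict.contains_eq_isSome_get?, hget]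
    cases dB.get? pfx <;> rfl
  have hstepB : pvStepB pl dB p = dB.insert pfx ((dB.getD pfx []) ++ [x]) := rfl
  rcases hB : dB.get? pfx with _ | g
  · -- new prefix: both append a fresh entry
    have hgd : dB.getD pfx [] = [] := PySem.Dict.getD_of_get?_eq_none _ [] hB
    have hcB : dB.contains pfx = false := by
      rw [PySem.Dict.contains_eq_isSome_get?, hB]; rfl
    have hcA : dA.contains pfx = false := by rw [hcont]; exact hcB
    have hA : pvStepA pl dA p = dA.insert pfx ([x.1], x.1, pvKeyB x, x.2) := by
      simp only [pvStepA, ← hpfx]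
      rw [hget, hB]
      rfl
    refine ⟨?_, ?_, ?_⟩
    · rw [hA, hstepB, hgd,
        PySem.Dict.items_insert_of_not_contains _ _ hcA,
        PySem.Dict.items_insert_of_not_contains _ _ hcB]
      simp only [List.map_append, h1, List.nil_append]
      simp [pvF, pvReduce, PySem.List.max?]
    · rw [hstepB, PySem.Dict.keys_insert_of_not_contains _ _ hcB]
      refine List.Nodup.append h2 (List.nodup_singleton _) ?_
      intro a ha hb
      simp only [List.mem_singleton] at hb
      subst hb
      exact absurd ((PySem.Dict.contains_iff_mem_keys _ _).mpr ha) (by simp [hcB])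
    · intro q hq
      rw [hstepB, hgd] at hq
      rcases (PySem.Dict.mem_items_insert _ _ _ _).mp hq with hq | ⟨hq, -⟩
      · subst hq; simp
      · exact h3 q hq
  · -- existing prefix: A overwrites in place, B appends to the group
    have hgd : dB.getD pfx [] = g := PySem.Dict.getD_of_get?_eq_some _ [] hB
    have hcB : dB.contains pfx = true := by
      rw [PySem.Dict.contains_eq_isSome_get?, hB]; rfl
    have hcA : dA.contains pfx = true := by rw [hcont]; exact hcB
    have hgne : g ≠ [] := h3 (pfx, g) (PySem.Dict.mem_items_of_get?_eq_some _ hB)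
    have hval : pvStepA pl dA p = dA.insert pfx (pvReduce (g ++ [x])) := by
      rw [pvReduce_append g x hgne]
      simp only [pvStepA, ← hpfx]
      rw [hget, hB]
      simp only [Option.map_some, hx, pvKeyB]
      split_ifs <;> rfl
    refine ⟨?_, ?_, ?_⟩
    · rw [hval, hstepB, hgd,
        PySem.Dict.items_insert_of_contains _ _ hcA,
        PySem.Dict.items_insert_of_contains _ _ hcB]
      simp only [h1, List.map_map]
      apply List.map_congr_left
      intro q hq
      by_cases hk : q.1 = pfx
      · have hqg : q.2 = g := by
          have hq2 : dB.get? q.1 = some q.2 := PySem.Dict.get?_of_mem_items _ hq h2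
          rw [hk, hB] at hq2
          exact (Option.some_inj.mp hq2).symm
        simp [Function.comp, pvF, hk, hqg]
      · simp [Function.comp, pvF, hk]
    · rw [hstepB, PySem.Dict.keys_insert_of_contains _ _ hcB]
      exact h2
    · intro q hq
      rw [hstepB, hgd] at hq
      rcases (PySem.Dict.mem_items_insert _ _ _ _).mp hq with hq | ⟨hq, -⟩
      · subst hq
        simp [hgne]
      · exact h3 q hq

theorem pvLoop_inv (pl : Int) (l : List (String × String))
    {dA : PySem.Dict String (List String × String × Int × String)}
    {dB : PySem.Dict String (List (String × String))} (h : pvInv dA dB) :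
    pvInv (l.foldl (pvStepA pl) dA) (l.foldl (pvStepB pl) dB) := by
  induction l generalizing dA dB with
  | nil => exact h
  | cons p t ih => exact ih (pvStep_inv pl p h)

theorem pvOut_eq (acc : List (String × String) × PySem.Dict String (List String))
    (g : List (String × String)) : pvOutA acc (pvReduce g) = pvOutB acc g := by
  rcases hm : PySem.List.max? g pvKeyB with _ | m
  · have hg : g = [] := (PySem.List.max?_eq_none_iff _ _).mp hm
    subst hg
    simp [pvOutA, pvOutB, pvReduce, hm]
  · simp [pvOutA, pvOutB, pvReduce, hm]

-- ===== VERDICT (by name: the statement is the Claim_ definition above) =====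
theorem prefilter_exact_prefixes_py_spec : Claim_equal_prefilter_exact_prefixes_py := by
  intro seqs pl _ _
  unfold Spec_prefilter_exact_prefixes_py prefilter_exact_prefixes_py prefilter_exact_prefixes_py_alt
  have hinv : pvInv (seqs.foldl (pvStepA pl) PySem.Dict.empty)
      (seqs.foldl (pvStepB pl) PySem.Dict.empty) :=
    pvLoop_inv pl seqs ⟨rfl, List.nodup_nil, by intro q hq; cases hq⟩
  obtain ⟨h1, -, -⟩ := hinv
  have hvals : (seqs.foldl (pvStepA pl) PySem.Dict.empty).values
      = (seqs.foldl (pvStepB pl) PySem.Dict.empty).values.map pvReduce := by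
    simp only [PySem.Dict.values, h1, List.map_map]
    rfl
  have hfun : (fun (acc : List (String × String) × PySem.Dict String (List String))
      (g : List (String × String)) => pvOutA acc (pvReduce g)) = pvOutB := by
    funext acc g
    exact pvOut_eq acc g
  dsimp only
  rw [hvals, List.foldl_map, hfun]
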